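-- pv_equiv track=rewrite | github.com/VictorStankov/Advent_Of_Code | 2025/Day 6/Python/task_1.py | solution
-- ===== SOURCE A (Python) =====
-- from math import prod
--
-- operator_map = {
--     '+': sum,
--     '*': prod,
-- }
--
-- def solution(data):
--     items_in_col = len(data) - 1
--
--     result = 0
--
--     for i in range(len(data[0])):
--         nums = []
--         for j in range(0, items_in_col):
--             nums.append(int(data[j][i]))
--         result += operator_map[data[items_in_col][i]](nums)
--     return result
-- ===== SOURCE B (Python) =====
-- def solution(data):
--     width = len(data[0])
--     col_sum = [0] * width
--     col_prod = [1] * width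
--     for row in data[:-1]:
--         for i in range(width):
--             v = int(row[i])
--             col_sum[i] += v
--             col_prod[i] *= v
--     ops = data[-1]
--     total = 0
--     for i in range(width):
--         total += col_sum[i] if ops[i] == '+' else col_prod[i]
--     return total
-- ===== Notes on version B (the rewrite author's own statement) =====
-- stated objective: alternative
-- what changed: Column-major per-column list building (fresh nums list plus a sum/prod call per column) is replaced by a row-major single streaming pass that maintains running per-column sum and product accumulators, with a final selection pass over the operator row.
import Mathlib
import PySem

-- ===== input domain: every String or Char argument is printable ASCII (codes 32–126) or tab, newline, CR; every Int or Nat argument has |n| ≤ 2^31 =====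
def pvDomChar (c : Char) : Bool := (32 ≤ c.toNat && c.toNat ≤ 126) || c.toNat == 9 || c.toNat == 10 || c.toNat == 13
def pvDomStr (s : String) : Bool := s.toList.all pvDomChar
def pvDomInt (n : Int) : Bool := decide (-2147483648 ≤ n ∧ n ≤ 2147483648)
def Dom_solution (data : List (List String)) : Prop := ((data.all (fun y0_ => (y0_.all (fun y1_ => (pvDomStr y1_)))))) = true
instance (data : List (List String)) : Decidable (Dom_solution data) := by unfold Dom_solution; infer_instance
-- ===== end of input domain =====

-- B replaces A's column-major pass (a fresh per-column list, then sum/prod) by a row-major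
-- streaming pass keeping running per-column sum and product accumulators; same cost, different traversal.

-- ===== PORT A =====
-- int(data[j][i]) with getD defaults; under Pre_ every lookup/parse succeeds.
def pvParse (row : List String) (i : Int) : Int :=
  (PySem.Int.ofStr? ((PySem.List.pyGet? row i).getD "")).getD 0

def solution (data : List (List String)) : Int :=
  let itemsInCol : Int := (data.length : Int) - 1
  (PySem.List.pyRange 0 (((PySem.List.pyGet? data 0).getD []).length : Int) 1).foldl
    (fun result i =>
      let nums : List Int :=
        (PySem.List.pyRange 0 itemsInCol 1).foldl
          (fun nums j => nums ++ [pvParse ((PySem.List.pyGet? data j).getD []) i]) []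
      let op := (PySem.List.pyGet? ((PySem.List.pyGet? data itemsInCol).getD []) i).getD ""
      result + (if op = "+" then nums.sum else if op = "*" then nums.prod else 0))
    0

-- ===== PORT B =====
-- inner loop of B: for i in range(width): v = int(row[i]); col_sum[i] += v; col_prod[i] *= v
def pvRowStep (width : Int) (st : List Int × List Int) (row : List String) : List Int × List Int :=
  (PySem.List.pyRange 0 width 1).foldl
    (fun st i =>
      let v := pvParse row i
      (st.1.set i.toNat ((st.1.getD i.toNat 0) + v), st.2.set i.toNat ((st.2.getD i.toNat 0) * v)))
    st

def solution_alt (data : List (List String)) : Int :=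
  let width : Int := (((PySem.List.pyGet? data 0).getD []).length : Int)
  -- data[:-1] is exactly List.dropLast; data[-1] via pyGet? (-1)
  let st := data.dropLast.foldl (pvRowStep width) (List.replicate width.toNat 0, List.replicate width.toNat 1)
  let ops := (PySem.List.pyGet? data (-1)).getD []
  (PySem.List.pyRange 0 width 1).foldl
    (fun total i =>
      total + (if (PySem.List.pyGet? ops i).getD "" = "+" then st.1.getD i.toNat 0 else st.2.getD i.toNat 0))
    0

-- ===== PRECONDITION & SPEC =====
-- Pre_ excludes exactly the inputs where the Python A raises: empty data (IndexError on data[0]),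
-- a row shorter than data[0] (IndexError), a non-integer entry in a scanned cell (ValueError),
-- or an operator symbol other than '+'/'*' (KeyError).
def Pre_solution (data : List (List String)) : Prop :=
  data ≠ [] ∧
  (∀ row ∈ data, ((data.headD []).length) ≤ row.length) ∧
  (∀ row ∈ data.dropLast, ∀ s ∈ row.take ((data.headD []).length), (PySem.Int.ofStr? s).isSome = true) ∧
  (∀ s ∈ (data.getLastD []).take ((data.headD []).length), s = "+" ∨ s = "*")
instance (data : List (List String)) : Decidable (Pre_solution data) := by unfold Pre_solution; infer_instance

def pvWitness_solution : List (List String) := [["1", "2"], ["3", "4"], ["+", "*"]]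

def Spec_solution (data : List (List String)) (out : Int) : Prop := out = solution_alt data
instance (data : List (List String)) (out : Int) : Decidable (Spec_solution data out) := by unfold Spec_solution; infer_instance

-- ===== CLAIM (what is proved, stated in full; the proofs are below) =====
def Claim_equal_solution : Prop := ∀ (data : List (List String)), Dom_solution data → Pre_solution data → Spec_solution data (solution data)

-- ===== LEMMAS AND PROOFS =====

-- column i of rows, parsed
def pvColvals (rows : List (List String)) (i : Int) : List Int := rows.map (fun row => pvParse row i)

theorem pvRowStep_spec (row : List String) (n : Nat) (s p : List Int) :
    (pvRowStep (n : Int) (s, p) row).1.length = s.length ∧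
    (pvRowStep (n : Int) (s, p) row).2.length = p.length ∧
    (∀ k : Nat, k < n → k < s.length →
      (pvRowStep (n : Int) (s, p) row).1.getD k 0 = s.getD k 0 + pvParse row (k : Int)) ∧
    (∀ k : Nat, k < n → k < p.length →
      (pvRowStep (n : Int) (s, p) row).2.getD k 0 = p.getD k 0 * pvParse row (k : Int)) ∧
    (∀ k : Nat, n ≤ k →
      (pvRowStep (n : Int) (s, p) row).1.getD k 0 = s.getD k 0 ∧
      (pvRowStep (n : Int) (s, p) row).2.getD k 0 = p.getD k 0) := by
  induction n with
  | zero =>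
    simp [pvRowStep, PySem.List.pyRange_one_eq_nil (by omega : (0:Int) ≤ 0)]
  | succ n ih =>
    have hcast : ((n + 1 : Nat) : Int) = (n : Int) + 1 := by push_cast; ring
    have hsplit : PySem.List.pyRange 0 ((n : Int) + 1) 1
        = PySem.List.pyRange 0 (n : Int) 1 ++ [(n : Int)] :=
      PySem.List.pyRange_one_succ_right (by omega)
    obtain ⟨ih1, ih2, ih3, ih4, ih5⟩ := ih
    have hstep : pvRowStep ((n + 1 : Nat) : Int) (s, p) row
        = (((pvRowStep (n : Int) (s, p) row).1.set n
              ((pvRowStep (n : Int) (s, p) row).1.getD n 0 + pvParse row (n : Int))),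
           ((pvRowStep (n : Int) (s, p) row).2.set n
              ((pvRowStep (n : Int) (s, p) row).2.getD n 0 * pvParse row (n : Int)))) := by
      simp only [pvRowStep, hcast, hsplit, List.foldl_append, List.foldl_cons, List.foldl_nil,
        Int.toNat_natCast]
    rw [hstep]
    refine ⟨by simpa using ih1, by simpa using ih2, ?_, ?_, ?_⟩
    · intro k hk hks
      by_cases hkn : k = n
      · subst hkn
        have hlt : k < (pvRowStep (k : Int) (s, p) row).1.length := by omega
        rw [List.getD_eq_getElem?_getD, List.getElem?_set_self hlt]
        simp only [Option.getD_some]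
        rw [(ih5 k le_rfl).1]
      · have hk' : k < n := by omega
        rw [List.getD_eq_getElem?_getD, List.getElem?_set_ne (by omega)]
        rw [← List.getD_eq_getElem?_getD]
        exact ih3 k hk' hks
    · intro k hk hkp
      by_cases hkn : k = n
      · subst hkn
        have hlt : k < (pvRowStep (k : Int) (s, p) row).2.length := by omega
        rw [List.getD_eq_getElem?_getD, List.getElem?_set_self hlt]
        simp only [Option.getD_some]
        rw [(ih5 k le_rfl).2]
      · have hk' : k < n := by omega
        rw [List.getD_eq_getElem?_getD, List.getElem?_set_ne (by omega)]
        rw [← List.getD_eq_getElem?_getD]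
        exact ih4 k hk' hkp
    · intro k hk
      constructor
      · rw [List.getD_eq_getElem?_getD, List.getElem?_set_ne (by omega),
          ← List.getD_eq_getElem?_getD]
        exact (ih5 k (by omega)).1
      · rw [List.getD_eq_getElem?_getD, List.getElem?_set_ne (by omega),
          ← List.getD_eq_getElem?_getD]
        exact (ih5 k (by omega)).2

theorem pvFold_spec (rows : List (List String)) (n : Nat) (s p : List Int)
    (hs : s.length = n) (hp : p.length = n) :
    (rows.foldl (pvRowStep (n : Int)) (s, p)).1.length = n ∧
    (rows.foldl (pvRowStep (n : Int)) (s, p)).2.length = n ∧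
    (∀ k : Nat, k < n →
      (rows.foldl (pvRowStep (n : Int)) (s, p)).1.getD k 0
          = s.getD k 0 + (pvColvals rows (k : Int)).sum ∧
      (rows.foldl (pvRowStep (n : Int)) (s, p)).2.getD k 0
          = p.getD k 0 * (pvColvals rows (k : Int)).prod) := by
  induction rows generalizing s p with
  | nil => simp [pvColvals, hs, hp]
  | cons row rows ih =>
    obtain ⟨h1, h2, h3, h4, _⟩ := pvRowStep_spec row n s p
    obtain ⟨g1, g2, g3⟩ := ih (pvRowStep (n : Int) (s, p) row).1
      (pvRowStep (n : Int) (s, p) row).2 (by omega) (by omega)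
    rw [Prod.mk.eta] at g1 g2 g3
    refine ⟨by simpa using g1, by simpa using g2, ?_⟩
    intro k hk
    have e1 := (g3 k hk).1
    have e2 := (g3 k hk).2
    simp only [List.foldl_cons]
    constructor
    · rw [e1, h3 k hk (by omega)]
      simp [pvColvals]
      ring
    · rw [e2, h4 k hk (by omega)]
      simp [pvColvals]
      ring

theorem solution_eq (data : List (List String)) (hpre : Pre_solution data) :
    solution data = solution_alt data := by
  obtain ⟨hne, hlen, _, hop⟩ := hpre
  cases data with
  | nil => exact absurd rfl hne
  | cons h t =>
    have hcons : (h :: t) ≠ [] := by simp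
    have hlast : (h :: t).getLast? = some ((h :: t).getLast hcons) :=
      List.getLast?_eq_some_getLast hcons
    have hlastlen : h.length ≤ ((h :: t).getLast hcons).length :=
      hlen _ (List.getLast_mem hcons)
    have hgld : (h :: t).getLastD [] = (h :: t).getLast hcons := by
      rw [List.getLastD_eq_getLast?, hlast, Option.getD_some]
    have hItems : ((h :: t).length : Int) - 1 = (t.length : Int) := by simp
    simp only [solution, solution_alt, PySem.List.pyGet?_zero, List.getElem?_cons_zero,
      Option.getD_some, hItems, Int.toNat_natCast]
    refine PySem.List.foldl_congr_mem _ _ _ _ ?_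
    intro acc i hi
    obtain ⟨hi0, hiw⟩ := PySem.List.mem_pyRange_one.mp hi
    set k : Nat := i.toNat with hk
    have hik : i = (k : Int) := by omega
    have hkw : k < h.length := by omega
    have hkL : k < ((h :: t).getLast hcons).length := by omega
    -- the operator row is the last row, reached by A at index len-1 and by B at -1
    have hopget : PySem.List.pyGet? (h :: t) ((t.length : Int))
        = some ((h :: t).getLast hcons) := by
      rw [PySem.List.pyGet?_of_nonneg _ (by omega)]
      simp only [Int.toNat_natCast]
      rw [show t.length = (h :: t).length - 1 by simp, ← List.getLast?_eq_getElem?, hlast]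
    have hopneg : PySem.List.pyGet? (h :: t) (-1)
        = some ((h :: t).getLast hcons) := by
      rw [PySem.List.pyGet?_neg_one, hlast]
    -- the selected operator symbol is '+' or '*'
    have hopk : PySem.List.pyGet? ((h :: t).getLast hcons) i
        = some (((h :: t).getLast hcons)[k]) := by
      rw [hik, PySem.List.pyGet?_of_nonneg _ (by omega)]
      simp [List.getElem?_eq_getElem hkL]
    have hopcase : ((h :: t).getLast hcons)[k] = "+" ∨ ((h :: t).getLast hcons)[k] = "*" := by
      refine hop _ ?_
      rw [hgld]
      have hkt : k < (((h :: t).getLast hcons).take h.length).length := by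
        simp; omega
      have := List.getElem_take (xs := (h :: t).getLast hcons) (j := h.length) (i := k) (h := hkt)
      rw [← this]
      exact List.getElem_mem hkt
    -- A's nums list is the parsed column of the first len-1 rows
    have hnums : (PySem.List.pyRange 0 ((t.length : Int)) 1).foldl
          (fun nums j => nums ++ [pvParse ((PySem.List.pyGet? (h :: t) j).getD []) i]) []
        = pvColvals ((h :: t).dropLast) i := by
      rw [PySem.List.foldl_append_singleton_eq_map, List.nil_append]
      have hdl : ((h :: t).dropLast).length = t.length := by simp
      rw [show ((t.length : Int)) = (((h :: t).dropLast).length : Int) by rw [hdl]]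
      have hcong : ∀ j ∈ PySem.List.pyRange 0 ((((h :: t).dropLast).length : Int)) 1,
          pvParse ((PySem.List.pyGet? (h :: t) j).getD []) i
            = pvParse (PySem.List.pyGetD ((h :: t).dropLast) j []) i := by
        intro j hj
        obtain ⟨hj0, hjlt⟩ := PySem.List.mem_pyRange_one.mp hj
        have hjn : j.toNat < ((h :: t).dropLast).length := by omega
        rw [PySem.List.pyGetD, PySem.List.pyGet?_of_nonneg _ hj0,
          PySem.List.pyGet?_of_nonneg _ hj0, List.getElem?_dropLast]
        rw [if_pos (by simp at hjn ⊢; omega)]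
      rw [List.map_congr_left hcong]
      rw [show (fun j => pvParse (PySem.List.pyGetD ((h :: t).dropLast) j []) i)
            = (fun row => pvParse row i) ∘ (fun j => PySem.List.pyGetD ((h :: t).dropLast) j []) from rfl,
        ← List.map_map, PySem.List.map_pyGetD_pyRange_zero']
      rfl
    -- B's accumulators at k hold the column sum and product
    obtain ⟨_, _, hvals⟩ := pvFold_spec ((h :: t).dropLast) h.length
      (List.replicate h.length 0) (List.replicate h.length 1)
      (by simp) (by simp)
    have hv := hvals k hkw
    rw [List.getD_replicate _ hkw, List.getD_replicate _ hkw] at hv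
    simp only [hnums, hopget, hopneg, Option.getD_some, hopk]
    rw [hv.1, hv.2, ← hik]
    rcases hopcase with hc | hc <;> rw [hc] <;> simp

-- ===== VERDICT (by name: the statement is the Claim_ definition above) =====
theorem solution_spec : Claim_equal_solution := by
  intro data _ hpre
  exact solution_eq data hpre
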